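-- pv_equiv track=rewrite | github.com/bena49/a49-vella-ai | backend/ai_router/ai_utils/formatters.py | format_views_for_display
-- ===== SOURCE A (Python) =====
-- def format_views_for_display(views, title="Model Views"):
--     if not views:
--         return f"{title}:\n( none )"
--
--     categories = {
--         "Floor Plans": [], "Ceiling Plans": [], "3D Views": [],
--         "Sections": [], "Elevations": [], "Details": [], "Other": []
--     }
--
--     for v in views:
--         name = v.get('name', 'Unknown')
--         vtype = str(v.get('type', '')).lower()
--
--         if "floorplan" in vtype: categories["Floor Plans"].append(name)
--         elif "ceilingplan" in vtype: categories["Ceiling Plans"].append(name)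
--         elif "threed" in vtype: categories["3D Views"].append(name)
--         elif "section" in vtype: categories["Sections"].append(name)
--         elif "elevation" in vtype: categories["Elevations"].append(name)
--         elif "drafting" in vtype: categories["Details"].append(name)
--         else: categories["Other"].append(name)
--
--     lines = [f"{title}:"]
--     for cat_name, items in categories.items():
--         if items:
--             lines.append(f"\n {cat_name} ({len(items)}):")
--             for item in sorted(items):
--                 lines.append(f" {item}")
--
--     return "\n".join(lines)
-- ===== SOURCE B (Python) =====
-- KEYWORDS = [
--     ("floorplan", "Floor Plans"),
--     ("ceilingplan", "Ceiling Plans"),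
--     ("threed", "3D Views"),
--     ("section", "Sections"),
--     ("elevation", "Elevations"),
--     ("drafting", "Details"),
-- ]
--
--
-- def _rank(vtype):
--     return next((i for i, (kw, _) in enumerate(KEYWORDS) if kw in vtype),
--                 len(KEYWORDS))
--
--
-- def format_views_for_display(views, title="Model Views"):
--     if not views:
--         return f"{title}:\n( none )"
--
--     ranked = [(_rank(str(v.get('type', '')).lower()), v.get('name', 'Unknown'))
--               for v in views]
--
--     parts = [f"{title}:"]
--     for i, cat in enumerate([c for _, c in KEYWORDS] + ["Other"]):
--         names = sorted(n for r, n in ranked if r == i)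
--         if names:
--             parts.append(f"\n {cat} ({len(names)}):")
--             parts.extend(f" {n}" for n in names)
--     return "\n".join(parts)
-- ===== Notes on version B (the rewrite author's own statement) =====
-- stated objective: alternative
-- what changed: B drops A's mutable seven-key dict built by an elif chain: it derives each view's category as a rank via first-match over an ordered keyword table, then emits each category block by a filter-and-sort pass over the ranked pairs, with no dict at all.
import Mathlib
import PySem

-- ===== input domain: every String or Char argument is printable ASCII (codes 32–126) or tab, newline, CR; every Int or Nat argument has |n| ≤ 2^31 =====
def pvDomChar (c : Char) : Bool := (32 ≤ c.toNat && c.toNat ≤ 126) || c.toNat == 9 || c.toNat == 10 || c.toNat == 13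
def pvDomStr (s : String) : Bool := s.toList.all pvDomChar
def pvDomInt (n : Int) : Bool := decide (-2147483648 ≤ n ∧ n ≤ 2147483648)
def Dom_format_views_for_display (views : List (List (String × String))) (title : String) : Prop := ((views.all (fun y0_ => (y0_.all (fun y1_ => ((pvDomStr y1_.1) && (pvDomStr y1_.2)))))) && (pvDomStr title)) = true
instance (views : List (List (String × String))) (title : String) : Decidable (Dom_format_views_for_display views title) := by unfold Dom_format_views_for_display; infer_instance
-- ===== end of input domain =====

-- B replaces A's mutable seven-key dict accumulation by a keyword table with a
-- first-match rank function and one filter-and-sort pass per category (objective: alternative).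

-- ===== PORT A =====
def format_views_for_display (views : List (List (String × String))) (title : String) : String :=
  if views = [] then title ++ ":\n( none )"
  else
    let cats0 : PySem.Dict String (List String) :=
      PySem.Dict.ofList [("Floor Plans", []), ("Ceiling Plans", []), ("3D Views", []),
        ("Sections", []), ("Elevations", []), ("Details", []), ("Other", [])]
    let cats := views.foldl (fun (c : PySem.Dict String (List String)) v =>
      let name := PySem.Dict.getD (PySem.Dict.mk v) "name" "Unknown"
      let vtype := PySem.Str.lower (PySem.Dict.getD (PySem.Dict.mk v) "type" "")
      if PySem.Str.isIn "floorplan" vtype then c.insert "Floor Plans" (c.getD "Floor Plans" [] ++ [name])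
      else if PySem.Str.isIn "ceilingplan" vtype then c.insert "Ceiling Plans" (c.getD "Ceiling Plans" [] ++ [name])
      else if PySem.Str.isIn "threed" vtype then c.insert "3D Views" (c.getD "3D Views" [] ++ [name])
      else if PySem.Str.isIn "section" vtype then c.insert "Sections" (c.getD "Sections" [] ++ [name])
      else if PySem.Str.isIn "elevation" vtype then c.insert "Elevations" (c.getD "Elevations" [] ++ [name])
      else if PySem.Str.isIn "drafting" vtype then c.insert "Details" (c.getD "Details" [] ++ [name])
      else c.insert "Other" (c.getD "Other" [] ++ [name])) cats0
    let lines := cats.items.foldl (fun (lines : List String) ci =>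
      if ci.2 = [] then lines
      else (lines ++ ["\n " ++ ci.1 ++ " (" ++ PySem.Int.toStr (PySem.List.len ci.2) ++ "):"]) ++
           (PySem.List.sorted ci.2 (fun x => x)).map (fun item => " " ++ item))
      [title ++ ":"]
    PySem.Str.join "\n" lines

-- ===== PORT B =====
def fvbKeywords : List (String × String) :=
  [("floorplan", "Floor Plans"), ("ceilingplan", "Ceiling Plans"), ("threed", "3D Views"),
   ("section", "Sections"), ("elevation", "Elevations"), ("drafting", "Details")]

def fvbRank (vtype : String) : Int :=
  match fvbKeywords.findIdx? (fun p => PySem.Str.isIn p.1 vtype) with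
  | some i => (i : Int)
  | none => PySem.List.len fvbKeywords

def format_views_for_display_alt (views : List (List (String × String))) (title : String) : String :=
  if views = [] then title ++ ":\n( none )"
  else
    let ranked := views.map (fun v =>
      (fvbRank (PySem.Str.lower (PySem.Dict.getD (PySem.Dict.mk v) "type" "")),
       PySem.Dict.getD (PySem.Dict.mk v) "name" "Unknown"))
    let parts := (PySem.List.enumerate ((fvbKeywords.map Prod.snd) ++ ["Other"])).foldl
      (fun (parts : List String) ic =>
        let names := PySem.List.sorted ((ranked.filter (fun p => p.1 == ic.1)).map Prod.snd) (fun x => x)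
        if names = [] then parts
        else (parts ++ ["\n " ++ ic.2 ++ " (" ++ PySem.Int.toStr (PySem.List.len names) ++ "):"]) ++
             names.map (fun n => " " ++ n))
      [title ++ ":"]
    PySem.Str.join "\n" parts

-- ===== PRECONDITION & SPEC =====
def Spec_format_views_for_display (views : List (List (String × String))) (title : String) (out : String) : Prop := out = format_views_for_display_alt views title
instance (views : List (List (String × String))) (title : String) (out : String) : Decidable (Spec_format_views_for_display views title out) := by unfold Spec_format_views_for_display; infer_instance

-- ===== CLAIM (what is proved, stated in full; the proofs are below) =====
def Claim_equal_format_views_for_display : Prop := ∀ (views : List (List (String × String))) (title : String), Dom_format_views_for_display views title → Spec_format_views_for_display views title (format_views_for_display views title)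

-- ===== LEMMAS AND PROOFS =====
def fvNm (v : List (String × String)) : String := PySem.Dict.getD (PySem.Dict.mk v) "name" "Unknown"
def fvTp (v : List (String × String)) : String := PySem.Str.lower (PySem.Dict.getD (PySem.Dict.mk v) "type" "")

def fvG (i : Int) (views : List (List (String × String))) : List String :=
  ((views.map (fun v => (fvbRank (fvTp v), fvNm v))).filter (fun p => p.1 == i)).map Prod.snd

def fvStep (c : PySem.Dict String (List String)) (v : List (String × String)) :
    PySem.Dict String (List String) :=
  if PySem.Str.isIn "floorplan" (fvTp v) then c.insert "Floor Plans" (c.getD "Floor Plans" [] ++ [fvNm v])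
  else if PySem.Str.isIn "ceilingplan" (fvTp v) then c.insert "Ceiling Plans" (c.getD "Ceiling Plans" [] ++ [fvNm v])
  else if PySem.Str.isIn "threed" (fvTp v) then c.insert "3D Views" (c.getD "3D Views" [] ++ [fvNm v])
  else if PySem.Str.isIn "section" (fvTp v) then c.insert "Sections" (c.getD "Sections" [] ++ [fvNm v])
  else if PySem.Str.isIn "elevation" (fvTp v) then c.insert "Elevations" (c.getD "Elevations" [] ++ [fvNm v])
  else if PySem.Str.isIn "drafting" (fvTp v) then c.insert "Details" (c.getD "Details" [] ++ [fvNm v])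
  else c.insert "Other" (c.getD "Other" [] ++ [fvNm v])

theorem fvbRank_unfold (t : String) : fvbRank t =
    (if PySem.Str.isIn "floorplan" t then 0
     else if PySem.Str.isIn "ceilingplan" t then 1
     else if PySem.Str.isIn "threed" t then 2
     else if PySem.Str.isIn "section" t then 3
     else if PySem.Str.isIn "elevation" t then 4
     else if PySem.Str.isIn "drafting" t then 5
     else (6 : Int)) := by
  unfold fvbRank fvbKeywords
  simp only [List.findIdx?_cons, List.findIdx?_nil]
  split_ifs <;> rfl

set_option maxHeartbeats 1600000 in
theorem fv_step_eq (v : List (String × String)) (l0 l1 l2 l3 l4 l5 l6 : List String) :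
    fvStep (PySem.Dict.mk [("Floor Plans", l0), ("Ceiling Plans", l1), ("3D Views", l2),
      ("Sections", l3), ("Elevations", l4), ("Details", l5), ("Other", l6)]) v =
    PySem.Dict.mk [("Floor Plans", l0 ++ if fvbRank (fvTp v) == 0 then [fvNm v] else []),
      ("Ceiling Plans", l1 ++ if fvbRank (fvTp v) == 1 then [fvNm v] else []),
      ("3D Views", l2 ++ if fvbRank (fvTp v) == 2 then [fvNm v] else []),
      ("Sections", l3 ++ if fvbRank (fvTp v) == 3 then [fvNm v] else []),
      ("Elevations", l4 ++ if fvbRank (fvTp v) == 4 then [fvNm v] else []),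
      ("Details", l5 ++ if fvbRank (fvTp v) == 5 then [fvNm v] else []),
      ("Other", l6 ++ if fvbRank (fvTp v) == 6 then [fvNm v] else [])] := by
  rw [fvbRank_unfold]
  unfold fvStep
  by_cases h0 : PySem.Str.isIn "floorplan" (fvTp v) = true
  · simp_all [PySem.Dict.insert, PySem.Dict.contains, PySem.Dict.getD, PySem.Dict.get?]
  · 
    by_cases h1 : PySem.Str.isIn "ceilingplan" (fvTp v) = true
    · simp_all [PySem.Dict.insert, PySem.Dict.contains, PySem.Dict.getD, PySem.Dict.get?]
    · 
      by_cases h2 : PySem.Str.isIn "threed" (fvTp v) = true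
      · simp_all [PySem.Dict.insert, PySem.Dict.contains, PySem.Dict.getD, PySem.Dict.get?]
      · 
        by_cases h3 : PySem.Str.isIn "section" (fvTp v) = true
        · simp_all [PySem.Dict.insert, PySem.Dict.contains, PySem.Dict.getD, PySem.Dict.get?]
        · 
          by_cases h4 : PySem.Str.isIn "elevation" (fvTp v) = true
          · simp_all [PySem.Dict.insert, PySem.Dict.contains, PySem.Dict.getD, PySem.Dict.get?]
          · 
            by_cases h5 : PySem.Str.isIn "drafting" (fvTp v) = true
            · simp_all [PySem.Dict.insert, PySem.Dict.contains, PySem.Dict.getD, PySem.Dict.get?]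
            · simp_all [PySem.Dict.insert, PySem.Dict.contains, PySem.Dict.getD, PySem.Dict.get?]

theorem fvG_cons (i : Int) (v : List (String × String)) (vs : List (List (String × String))) :
    fvG i (v :: vs) = (if fvbRank (fvTp v) == i then [fvNm v] else []) ++ fvG i vs := by
  by_cases h : fvbRank (fvTp v) == i <;> simp_all [fvG]

theorem fv_dict_fold (views : List (List (String × String)))
    (l0 l1 l2 l3 l4 l5 l6 : List String) :
    views.foldl fvStep
      (PySem.Dict.mk [("Floor Plans", l0), ("Ceiling Plans", l1), ("3D Views", l2),
        ("Sections", l3), ("Elevations", l4), ("Details", l5), ("Other", l6)]) =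
    PySem.Dict.mk [("Floor Plans", l0 ++ fvG 0 views), ("Ceiling Plans", l1 ++ fvG 1 views),
      ("3D Views", l2 ++ fvG 2 views), ("Sections", l3 ++ fvG 3 views),
      ("Elevations", l4 ++ fvG 4 views), ("Details", l5 ++ fvG 5 views),
      ("Other", l6 ++ fvG 6 views)] := by
  induction views generalizing l0 l1 l2 l3 l4 l5 l6 with
  | nil => simp [fvG]
  | cons v vs ih =>
    rw [List.foldl_cons, fv_step_eq, ih]
    simp only [fvG_cons, List.append_assoc]


theorem fv_dict_fold0 (views : List (List (String × String))) :
    views.foldl fvStep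
      (PySem.Dict.mk [("Floor Plans", []), ("Ceiling Plans", []), ("3D Views", []),
        ("Sections", []), ("Elevations", []), ("Details", []), ("Other", [])]) =
    PySem.Dict.mk [("Floor Plans", fvG 0 views), ("Ceiling Plans", fvG 1 views),
      ("3D Views", fvG 2 views), ("Sections", fvG 3 views), ("Elevations", fvG 4 views),
      ("Details", fvG 5 views), ("Other", fvG 6 views)] := by
  simpa using fv_dict_fold views [] [] [] [] [] [] []

-- ===== VERDICT (by name: the statement is the Claim_ definition above) =====
set_option maxHeartbeats 1600000 in
theorem format_views_for_display_spec : Claim_equal_format_views_for_display := by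
  intro views title _
  unfold Spec_format_views_for_display
  by_cases hv : views = []
  · simp [format_views_for_display, format_views_for_display_alt, hv]
  · unfold format_views_for_display format_views_for_display_alt
    rw [if_neg hv, if_neg hv]
    show PySem.Str.join "\n"
        ((PySem.Dict.items (views.foldl fvStep
            (PySem.Dict.mk [("Floor Plans", []), ("Ceiling Plans", []), ("3D Views", []),
              ("Sections", []), ("Elevations", []), ("Details", []), ("Other", [])]))).foldl
          (fun lines ci =>
            if ci.2 = [] then lines
            else (lines ++ ["\n " ++ ci.1 ++ " (" ++ PySem.Int.toStr (PySem.List.len ci.2) ++ "):"]) ++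
              (PySem.List.sorted ci.2 (fun x => x)).map (fun item => " " ++ item))
          [title ++ ":"]) =
      PySem.Str.join "\n"
        (([((0 : Int), "Floor Plans"), (1, "Ceiling Plans"), (2, "3D Views"), (3, "Sections"),
           (4, "Elevations"), (5, "Details"), (6, "Other")]).foldl
          (fun parts (ic : Int × String) =>
            if PySem.List.sorted (fvG ic.1 views) (fun x => x) = [] then parts
            else (parts ++ ["\n " ++ ic.2 ++ " (" ++
                    PySem.Int.toStr (PySem.List.len (PySem.List.sorted (fvG ic.1 views) (fun x => x))) ++ "):"]) ++
              (PySem.List.sorted (fvG ic.1 views) (fun x => x)).map (fun n => " " ++ n))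
          [title ++ ":"])
    rw [fv_dict_fold0]
    rw [show PySem.Dict.items (PySem.Dict.mk [("Floor Plans", fvG 0 views),
      ("Ceiling Plans", fvG 1 views), ("3D Views", fvG 2 views), ("Sections", fvG 3 views),
      ("Elevations", fvG 4 views), ("Details", fvG 5 views), ("Other", fvG 6 views)]) =
      [("Floor Plans", fvG 0 views), ("Ceiling Plans", fvG 1 views), ("3D Views", fvG 2 views),
       ("Sections", fvG 3 views), ("Elevations", fvG 4 views), ("Details", fvG 5 views),
       ("Other", fvG 6 views)] from rfl]
    simp only [List.foldl_cons, List.foldl_nil]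
    simp only [PySem.List.sorted_eq_nil_iff, PySem.List.len_eq, PySem.List.length_sorted]
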